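-- pv_equiv track=rewrite | github.com/DesTuu/DesToBOT | cmds/lobby_setup.py | get_roles_from_mode
-- ===== SOURCE A (Python) =====
-- ROLE_MAP = {
--     "ranked": 1286456167568113685,
--     "clash": 1449462109879406803,
--     "normal": 1286456104582123520,
--     "aram": 1344395311233372190,
--     "tft": 1286456220961472512,
-- }
--
-- def get_roles_from_mode(mode: str):
--     mode = mode.lower()
--     roles = set()
--
--     if any(x in mode for x in ["solo", "duo", "ranked", "flex"]):
--         roles.add(ROLE_MAP["ranked"])
--
--     if "clash" in mode:
--         roles.add(ROLE_MAP["clash"])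
--
--     if any(x in mode for x in ["draft", "normal", "swift", "szybka"]):
--         roles.add(ROLE_MAP["normal"])
--
--     if any(x in mode for x in ["aram", "chaos", "mayhem"]):
--         roles.add(ROLE_MAP["aram"])
--
--     if any(x in mode for x in ["tft", "double up"]):
--         roles.add(ROLE_MAP["tft"])
--
--     return roles
-- ===== SOURCE B (Python) =====
-- PATTERNS = [
--     ("solo", "ranked"), ("duo", "ranked"), ("ranked", "ranked"), ("flex", "ranked"),
--     ("clash", "clash"),
--     ("draft", "normal"), ("normal", "normal"), ("swift", "normal"), ("szybka", "normal"),
--     ("aram", "aram"), ("chaos", "aram"), ("mayhem", "aram"),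
--     ("tft", "tft"), ("double up", "tft"),
-- ]
--
-- ROLE_IDS = {
--     "ranked": 1286456167568113685,
--     "clash": 1449462109879406803,
--     "normal": 1286456104582123520,
--     "aram": 1344395311233372190,
--     "tft": 1286456220961472512,
-- }
--
-- def get_roles_from_mode(mode: str):
--     # Single left-to-right scan of the string: at every position, prefix-match
--     # all patterns at once (a hand-rolled multi-pattern matcher), recording which
--     # categories occur; then emit the role ids of the matched categories.
--     mode = mode.lower()
--     hit = set()
--     for i in range(len(mode)):
--         tail = mode[i:]
--         for kw, cat in PATTERNS:
--             if tail.startswith(kw):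
--                 hit.add(cat)
--     roles = set()
--     for cat, role_id in ROLE_IDS.items():
--         if cat in hit:
--             roles.add(role_id)
--     return roles
-- ===== Notes on version B (the rewrite author's own statement) =====
-- stated objective: alternative
-- what changed: B replaces A's per-keyword substring tests ('x in mode' for each keyword group) by a positional scan of the string that prefix-matches all patterns at each index (a hand-rolled multi-pattern matcher), collecting matched categories and then emitting their role ids; correct because a keyword is a substring iff it is a prefix of some suffix.
import Mathlib
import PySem

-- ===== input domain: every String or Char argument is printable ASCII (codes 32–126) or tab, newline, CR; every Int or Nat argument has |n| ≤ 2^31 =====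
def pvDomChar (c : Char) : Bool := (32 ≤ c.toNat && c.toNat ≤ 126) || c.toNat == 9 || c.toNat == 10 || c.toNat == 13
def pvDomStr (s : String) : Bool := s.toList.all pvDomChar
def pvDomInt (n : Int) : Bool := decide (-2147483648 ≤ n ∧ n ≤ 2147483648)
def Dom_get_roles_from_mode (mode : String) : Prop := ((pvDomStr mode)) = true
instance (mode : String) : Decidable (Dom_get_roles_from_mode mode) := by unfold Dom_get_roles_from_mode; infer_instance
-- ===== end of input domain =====

-- B replaces A's per-keyword substring tests by a positional scan that prefix-matches
-- all patterns at each index and then emits role ids per matched category; objective: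
-- alternative algorithm, not faster.


-- ===== PORT A =====
-- ROLE_MAP as an association list (dict, insertion order)
def ROLE_MAP : PySem.Dict String Int := PySem.Dict.mk
  [("ranked", 1286456167568113685), ("clash", 1449462109879406803),
   ("normal", 1286456104582123520), ("aram", 1344395311233372190),
   ("tft", 1286456220961472512)]

def get_roles_from_mode (mode : String) : List Int :=
  let m := PySem.Str.lower mode
  let roles : PySem.Set Int := PySem.Set.empty
  let roles := if (["solo", "duo", "ranked", "flex"] : List String).any
      (fun x => PySem.Str.isIn x m) then PySem.Set.add roles (ROLE_MAP.getD "ranked" 0) else roles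
  let roles := if PySem.Str.isIn "clash" m then PySem.Set.add roles (ROLE_MAP.getD "clash" 0) else roles
  let roles := if (["draft", "normal", "swift", "szybka"] : List String).any
      (fun x => PySem.Str.isIn x m) then PySem.Set.add roles (ROLE_MAP.getD "normal" 0) else roles
  let roles := if (["aram", "chaos", "mayhem"] : List String).any
      (fun x => PySem.Str.isIn x m) then PySem.Set.add roles (ROLE_MAP.getD "aram" 0) else roles
  let roles := if (["tft", "double up"] : List String).any
      (fun x => PySem.Str.isIn x m) then PySem.Set.add roles (ROLE_MAP.getD "tft" 0) else roles
  roles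

-- ===== PORT B =====
-- (keyword, category) patterns, prefix-matched at every position of the string
def PATTERNS : List (String × String) :=
  [("solo", "ranked"), ("duo", "ranked"), ("ranked", "ranked"), ("flex", "ranked"),
   ("clash", "clash"),
   ("draft", "normal"), ("normal", "normal"), ("swift", "normal"), ("szybka", "normal"),
   ("aram", "aram"), ("chaos", "aram"), ("mayhem", "aram"),
   ("tft", "tft"), ("double up", "tft")]

def ROLE_IDS : PySem.Dict String Int := PySem.Dict.mk
  [("ranked", 1286456167568113685), ("clash", 1449462109879406803),
   ("normal", 1286456104582123520), ("aram", 1344395311233372190),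
   ("tft", 1286456220961472512)]

def get_roles_from_mode_alt (mode : String) : List Int :=
  let m := PySem.Str.lower mode
  -- for i in range(len(mode)): tail = mode[i:]; prefix-match every pattern at i
  let hit : PySem.Set String :=
    (PySem.List.pyRange 0 (PySem.Str.len m) 1).foldl
      (fun hit i =>
        let tail := PySem.Str.slice m (some i) none
        PATTERNS.foldl
          (fun hit p => if PySem.Str.startswith tail p.1 then PySem.Set.add hit p.2 else hit)
          hit)
      PySem.Set.empty
  -- for cat, role_id in ROLE_IDS.items(): if cat in hit: roles.add(role_id)
  ROLE_IDS.items.foldl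
    (fun roles cv => if PySem.Set.contains hit cv.1 then PySem.Set.add roles cv.2 else roles)
    (PySem.Set.empty : PySem.Set Int)

-- ===== PRECONDITION & SPEC =====
def Spec_get_roles_from_mode (mode : String) (out : List Int) : Prop := out = get_roles_from_mode_alt mode
instance (mode : String) (out : List Int) : Decidable (Spec_get_roles_from_mode mode out) := by unfold Spec_get_roles_from_mode; infer_instance

-- ===== CLAIM (what is proved, stated in full; the proofs are below) =====
def Claim_equal_get_roles_from_mode : Prop := ∀ (mode : String), Dom_get_roles_from_mode mode → Spec_get_roles_from_mode mode (get_roles_from_mode mode)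

-- ===== LEMMAS AND PROOFS =====

-- membership after a fold of conditional Set.add
theorem pv_mem_foldl_condadd {α β : Type} [BEq β] [LawfulBEq β]
    (l : List α) (f : α → Bool) (g : α → β) (s : PySem.Set β) (x : β) :
    x ∈ l.foldl (fun s a => if f a then PySem.Set.add s (g a) else s) s ↔
      x ∈ s ∨ ∃ a ∈ l, f a = true ∧ g a = x := by
  induction l generalizing s with
  | nil => simp
  | cons a l ih =>
    rw [List.foldl_cons]
    by_cases h : f a = true
    · rw [if_pos h, ih]
      simp only [PySem.Set.mem_add, List.mem_cons]
      constructor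
      · rintro ((hs | rfl) | ⟨b, hb, hf, hg⟩)
        · exact Or.inl hs
        · exact Or.inr ⟨a, Or.inl rfl, h, rfl⟩
        · exact Or.inr ⟨b, Or.inr hb, hf, hg⟩
      · rintro (hs | ⟨b, (rfl | hb), hf, hg⟩)
        · exact Or.inl (Or.inl hs)
        · exact Or.inl (Or.inr hg.symm)
        · exact Or.inr ⟨b, hb, hf, hg⟩
    · rw [if_neg h, ih]
      simp only [List.mem_cons]
      constructor
      · rintro (hs | ⟨b, hb, hf, hg⟩)
        · exact Or.inl hs
        · exact Or.inr ⟨b, Or.inr hb, hf, hg⟩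
      · rintro (hs | ⟨b, (rfl | hb), hf, hg⟩)
        · exact Or.inl hs
        · exact absurd hf h
        · exact Or.inr ⟨b, hb, hf, hg⟩

-- membership in the nested positional scan
theorem pv_mem_scan (m : String) (c : String) :
    c ∈ (PySem.List.pyRange 0 (PySem.Str.len m) 1).foldl
          (fun hit i =>
            PATTERNS.foldl
              (fun hit p => if PySem.Str.startswith (PySem.Str.slice m (some i) none) p.1
                            then PySem.Set.add hit p.2 else hit)
              hit)
          (PySem.Set.empty : PySem.Set String) ↔
      ∃ i ∈ PySem.List.pyRange 0 (PySem.Str.len m) 1, ∃ p ∈ PATTERNS,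
        PySem.Str.startswith (PySem.Str.slice m (some i) none) p.1 = true ∧ p.2 = c := by
  have key : ∀ (l : List Int) (s : PySem.Set String),
      c ∈ l.foldl (fun hit i =>
            PATTERNS.foldl
              (fun hit p => if PySem.Str.startswith (PySem.Str.slice m (some i) none) p.1
                            then PySem.Set.add hit p.2 else hit) hit) s ↔
        c ∈ s ∨ ∃ i ∈ l, ∃ p ∈ PATTERNS,
          PySem.Str.startswith (PySem.Str.slice m (some i) none) p.1 = true ∧ p.2 = c := by
    intro l
    induction l with
    | nil => simp
    | cons i l ih =>
      intro s
      rw [List.foldl_cons, ih,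
        pv_mem_foldl_condadd PATTERNS
          (fun p => PySem.Str.startswith (PySem.Str.slice m (some i) none) p.1) Prod.snd s c]
      simp only [List.mem_cons]
      constructor
      · rintro ((hs | ⟨p, hp, hf, hg⟩) | ⟨j, hj, hrest⟩)
        · exact Or.inl hs
        · exact Or.inr ⟨i, Or.inl rfl, p, hp, hf, hg⟩
        · exact Or.inr ⟨j, Or.inr hj, hrest⟩
      · rintro (hs | ⟨j, (rfl | hj), hrest⟩)
        · exact Or.inl (Or.inl hs)
        · exact Or.inl (Or.inr hrest)
        · exact Or.inr ⟨j, hj, hrest⟩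
  rw [key]
  simp [PySem.Set.empty]

theorem pv_mem_pyRange0 (n : Nat) (i : Int) :
    i ∈ PySem.List.pyRange 0 (n : Int) 1 ↔ 0 ≤ i ∧ i < (n : Int) := by
  simp only [PySem.List.pyRange]
  constructor
  · intro h
    simp at h
    obtain ⟨a, ha, rfl⟩ := h
    split at ha <;> omega
  · rintro ⟨h0, h1⟩
    simp
    exact ⟨i.toNat, by split <;> omega, by omega⟩

theorem pv_len_eq (m : String) : PySem.Str.len m = ((m.toList.length : Nat) : Int) := by
  simp

-- a nonempty keyword is a prefix of mode[i:] for some i in range(len(mode)) iff it is a substring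
theorem pv_exists_pos_iff_isIn (m kw : String) (hkw : kw.toList ≠ []) :
    (∃ i ∈ PySem.List.pyRange 0 (PySem.Str.len m) 1,
        PySem.Str.startswith (PySem.Str.slice m (some i) none) kw = true) ↔
      PySem.Str.isIn kw m = true := by
  rw [pv_len_eq]
  constructor
  · rintro ⟨i, hi, hsw⟩
    rw [pv_mem_pyRange0] at hi
    rw [PySem.Str.startswith_eq, PySem.Str.toList_slice, PySem.Chars.startswith_iff] at hsw
    have hcast : i = ((i.toNat : Nat) : Int) := by omega
    rw [hcast, PySem.Chars.slice_eq_listSlice, PySem.List.slice_from_natCast] at hsw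
    rw [PySem.Str.isIn_eq, ← PySem.Chars.exists_prefix_drop_iff_isIn]
    exact ⟨i.toNat, hsw⟩
  · intro h
    rw [PySem.Str.isIn_eq, ← PySem.Chars.exists_prefix_drop_iff_isIn] at h
    obtain ⟨j, hj⟩ := h
    have hjlt : j < m.toList.length := by
      by_contra hge
      rw [List.drop_eq_nil_of_le (by omega)] at hj
      exact hkw (List.prefix_nil.mp hj)
    refine ⟨(j : Int), ?_, ?_⟩
    · rw [pv_mem_pyRange0]
      omega
    · rw [PySem.Str.startswith_eq, PySem.Str.toList_slice, PySem.Chars.slice_eq_listSlice,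
        PySem.List.slice_from_natCast, PySem.Chars.startswith_iff]
      exact hj

theorem pv_contains_iff (s : PySem.Set String) (x : String) :
    PySem.Set.contains s x = true ↔ x ∈ s := by
  simp [PySem.Set.contains]

-- containment of one category in the scan's hit set = A's any-of-keywords substring test
theorem pv_hit_eq (m c : String) (kws : List String)
    (hkws : (PATTERNS.filter (fun p => p.2 == c)).map Prod.fst = kws)
    (hne : ∀ kw ∈ kws, kw.toList ≠ []) :
    PySem.Set.contains
      ((PySem.List.pyRange 0 (PySem.Str.len m) 1).foldl
        (fun hit i =>
          PATTERNS.foldl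
            (fun hit p => if PySem.Str.startswith (PySem.Str.slice m (some i) none) p.1
                          then PySem.Set.add hit p.2 else hit)
            hit)
        (PySem.Set.empty : PySem.Set String)) c
    = kws.any (fun x => PySem.Str.isIn x m) := by
  rw [Bool.eq_iff_iff, pv_contains_iff, pv_mem_scan, List.any_eq_true]
  constructor
  · rintro ⟨i, hi, p, hp, hsw, hc⟩
    have hk : p.1 ∈ kws := by
      rw [← hkws]
      simp only [List.mem_map, List.mem_filter]
      exact ⟨p, ⟨hp, by simp [hc]⟩, rfl⟩
    refine ⟨p.1, hk, ?_⟩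
    rw [← pv_exists_pos_iff_isIn m p.1 (hne _ hk)]
    exact ⟨i, hi, hsw⟩
  · rintro ⟨kw, hk, hin⟩
    rw [← hkws] at hk
    simp only [List.mem_map, List.mem_filter] at hk
    obtain ⟨p, ⟨hp, hbeq⟩, rfl⟩ := hk
    have hc : p.2 = c := by simpa using hbeq
    rw [← pv_exists_pos_iff_isIn m p.1 (hne _ (by rw [← hkws]; simp only [List.mem_map, List.mem_filter]; exact ⟨p, ⟨hp, hbeq⟩, rfl⟩))] at hin
    obtain ⟨i, hi, hsw⟩ := hin
    exact ⟨i, hi, p, hp, hsw, hc⟩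

theorem get_roles_from_mode_eq (mode : String) :
    get_roles_from_mode mode = get_roles_from_mode_alt mode := by
  unfold get_roles_from_mode get_roles_from_mode_alt
  simp only [ROLE_IDS, List.foldl_cons, List.foldl_nil]
  rw [pv_hit_eq (PySem.Str.lower mode) "ranked" ["solo", "duo", "ranked", "flex"] (by decide) (by decide),
    pv_hit_eq (PySem.Str.lower mode) "clash" ["clash"] (by decide) (by decide),
    pv_hit_eq (PySem.Str.lower mode) "normal" ["draft", "normal", "swift", "szybka"] (by decide) (by decide),
    pv_hit_eq (PySem.Str.lower mode) "aram" ["aram", "chaos", "mayhem"] (by decide) (by decide),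
    pv_hit_eq (PySem.Str.lower mode) "tft" ["tft", "double up"] (by decide) (by decide)]
  simp only [List.any_cons, List.any_nil, Bool.or_false]
  rfl

-- ===== VERDICT (by name: the statement is the Claim_ definition above) =====
theorem get_roles_from_mode_spec : Claim_equal_get_roles_from_mode := by
  intro mode _
  exact get_roles_from_mode_eq mode
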